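-- pv_equiv track=rewrite | github.com/sgowdaks/CP_Problems | graph/bell-ford.py | min_unique_centers_corrected
-- ===== SOURCE A (Python) =====
-- def min_unique_centers_corrected(d):
--     """
--     Calculates the minimum number of unique distribution centers required
--     using the longest path in a constraint graph approach (Bellman-Ford based).
--
--     Args:
--       d: A list of integers representing the daily demands.
--
--     Returns:
--       An integer representing the minimum number of unique distribution
--       centers needed.
--     """
--     n = len(d)
--
--     # If there's no demand data or only one day, we only need 1 center.
--     if n <= 1:
--         return 1
--
--     # Store all constraint edges: (u, v, weight) means id[v] >= id[u] + weight
--     # This represents the dependencies for calculating longest paths.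
--     edges = []
--     for i in range(1, n):
--         if d[i] > d[i-1]:
--             # Constraint: id[i] >= id[i-1] + 1
--             # Edge (i-1) -> i with weight 1
--             edges.append((i-1, i, 1))
--         elif d[i] < d[i-1]:
--             # Constraint: id[i-1] >= id[i] + 1
--             # Edge i -> (i-1) with weight 1
--             edges.append((i, i-1, 1))
--         else: # d[i] == d[i-1]
--             # Constraint: id[i] = id[i-1]
--             # Equivalent to id[i] >= id[i-1] + 0 and id[i-1] >= id[i] + 0
--             # Edge (i-1) -> i with weight 0
--             # Edge i -> (i-1) with weight 0
--             edges.append((i-1, i, 0))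
--             edges.append((i, i-1, 0))
--
--     # Initialize distances (longest path ending at node i from some implicit start)
--     # We assume we can start at any node with a path length of 0 initially.
--     # A path of length 0 just involves the node itself.
--     dist = [0] * n
--
--     # Relax edges up to n times.
--     # This is based on the Bellman-Ford algorithm concept. For finding the
--     # longest path in a DAG or graphs with non-negative weights (like here, 0 or 1),
--     # iterating n times ensures the longest path values propagate correctly,
--     # even if there are zero-weight cycles (which don't increase path length).
--     for _ in range(n):
--         updated = False
--         for u, v, w in edges:
--             # If we found a longer path to node v by going through node u
--             if dist[v] < dist[u] + w:
--                 dist[v] = dist[u] + w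
--                 updated = True
--
--         # Optimization: If a full pass over all edges doesn't update any
--         # distances, the longest paths have been found, and we can stop early.
--         if not updated:
--             break
--
--     # The length of the overall longest path in the constraint graph is the
--     # maximum value found in the dist array.
--     max_dist = 0
--     if dist: # Avoid error if n=0 (although handled by the n<=1 check)
--         max_dist = max(dist)
--
--     # The minimum number of unique centers needed corresponds to the number of
--     # distinct levels required by the longest path. A path of length L
--     # involves L+1 distinct levels/nodes/centers.
--     return max_dist + 1
-- ===== SOURCE B (Python) =====
-- def min_unique_centers_corrected(d):
--     n = len(d)
--     up = [0] * n
--     for i in range(1, n):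
--         if d[i] > d[i-1]:
--             up[i] = up[i-1] + 1
--         elif d[i] == d[i-1]:
--             up[i] = up[i-1]
--     down = [0] * n
--     for i in range(n-2, -1, -1):
--         if d[i] > d[i+1]:
--             down[i] = down[i+1] + 1
--         elif d[i] == d[i+1]:
--             down[i] = down[i+1]
--     best = 0
--     for i in range(n):
--         best = max(best, up[i], down[i])
--     return best + 1
-- ===== Notes on version B (the rewrite author's own statement) =====
-- stated objective: faster
-- what changed: Replaces the Bellman-Ford relaxation over an explicit constraint-edge list (up to n passes over ~n edges) by two linear candy-style scans computing, per position, the longest weakly-joined strict ascent from the left and strict descent to the right; the answer is their overall max plus one.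
import Mathlib
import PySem

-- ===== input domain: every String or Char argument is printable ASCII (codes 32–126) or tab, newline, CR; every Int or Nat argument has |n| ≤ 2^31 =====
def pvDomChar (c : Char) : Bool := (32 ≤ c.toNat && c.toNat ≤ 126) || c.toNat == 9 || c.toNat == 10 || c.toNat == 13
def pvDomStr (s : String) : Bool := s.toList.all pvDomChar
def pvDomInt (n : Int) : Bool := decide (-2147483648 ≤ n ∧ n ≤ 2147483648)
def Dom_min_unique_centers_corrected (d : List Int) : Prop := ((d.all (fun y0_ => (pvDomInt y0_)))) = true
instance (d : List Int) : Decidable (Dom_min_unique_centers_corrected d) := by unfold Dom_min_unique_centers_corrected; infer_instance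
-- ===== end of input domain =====

-- B replaces A's O(n²) Bellman-Ford relaxation over a constraint-edge list by two O(n)
-- candy-style scans (longest weakly-joined ascent from the left / descent to the right).

-- ===== PORT A =====
-- d[i] for an in-range nonnegative index (all indices below are built from range(1,n))
def pvG (d : List Int) (i : Nat) : Int := d.getD i 0

-- 'edges.append…' loop over range(1, n)
def pvEdges (d : List Int) : List (Nat × Nat × Int) :=
  (List.range' 1 (d.length - 1)).foldl (fun es i =>
    if pvG d i > pvG d (i-1) then es ++ [(i-1, i, (1 : Int))]
    else if pvG d i < pvG d (i-1) then es ++ [(i, i-1, (1 : Int))]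
    else es ++ [(i-1, i, (0 : Int)), (i, i-1, (0 : Int))]) []

-- one relaxation of a single edge, carrying (dist, updated)
def pvStep (st : List Int × Bool) (e : Nat × Nat × Int) : List Int × Bool :=
  if st.1.getD e.2.1 0 < st.1.getD e.1 0 + e.2.2 then
    (st.1.set e.2.1 (st.1.getD e.1 0 + e.2.2), true)
  else st

-- 'for _ in range(n): … if not updated: break'
def pvLoop (E : List (Nat × Nat × Int)) : Nat → List Int → List Int
  | 0, dist => dist
  | k+1, dist =>
    let r := E.foldl pvStep (dist, false)
    if r.2 then pvLoop E k r.1 else r.1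

def min_unique_centers_corrected (d : List Int) : Int :=
  let n := d.length
  if n ≤ 1 then 1
  else
    let dist := pvLoop (pvEdges d) n (List.replicate n (0 : Int))
    -- max_dist = 0; if dist: max_dist = max(dist)  (dist is nonempty here, so max? is some)
    let max_dist : Int :=
      if dist.length ≠ 0 then (PySem.List.max? dist (fun y => y)).getD 0 else 0
    max_dist + 1

-- ===== PORT B =====
def min_unique_centers_corrected_alt (d : List Int) : Int :=
  let n := d.length
  -- up[i]: strict rises on the best weakly-increasing walk from the left ending at i
  let up := (List.range' 1 (n - 1)).foldl (fun up i =>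
      if pvG d i > pvG d (i-1) then up.set i (up.getD (i-1) 0 + 1)
      else if pvG d i = pvG d (i-1) then up.set i (up.getD (i-1) 0)
      else up) (List.replicate n (0 : Int))
  -- down[i]: strict falls to the right, scanned i = n-2 … 0
  let down := ((List.range (n - 1)).reverse).foldl (fun dn i =>
      if pvG d i > pvG d (i+1) then dn.set i (dn.getD (i+1) 0 + 1)
      else if pvG d i = pvG d (i+1) then dn.set i (dn.getD (i+1) 0)
      else dn) (List.replicate n (0 : Int))
  let best := (List.range n).foldl (fun b i => max (max b (up.getD i 0)) (down.getD i 0)) (0 : Int)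
  best + 1

-- ===== PRECONDITION & SPEC =====
def Spec_min_unique_centers_corrected (d : List Int) (out : Int) : Prop := out = min_unique_centers_corrected_alt d
instance (d : List Int) (out : Int) : Decidable (Spec_min_unique_centers_corrected d out) := by unfold Spec_min_unique_centers_corrected; infer_instance

-- ===== CLAIM (what is proved, stated in full; the proofs are below) =====
def Claim_equal_min_unique_centers_corrected : Prop := ∀ (d : List Int), Dom_min_unique_centers_corrected d → Spec_min_unique_centers_corrected d (min_unique_centers_corrected d)

-- ===== LEMMAS AND PROOFS =====

-- specification values: upF/downF are what B's scans compute, and the Bellman-Ford fixpoint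
def upF (d : List Int) : Nat → Int
  | 0 => 0
  | i+1 => if pvG d (i+1) > pvG d i then upF d i + 1
           else if pvG d (i+1) = pvG d i then upF d i else 0

def downF (d : List Int) (i : Nat) : Int :=
  if _h : i + 1 < d.length then
    (if pvG d i > pvG d (i+1) then downF d (i+1) + 1
     else if pvG d i = pvG d (i+1) then downF d (i+1) else 0)
  else 0
termination_by d.length - i

def Dfun (d : List Int) (i : Nat) : Int := max (upF d i) (downF d i)

lemma upF_nonneg (d : List Int) (i : Nat) : 0 ≤ upF d i := by
  induction i with
  | zero => simp [upF]
  | succ j ih => simp only [upF]; split_ifs <;> omega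

lemma downF_nonneg (d : List Int) (i : Nat) : 0 ≤ downF d i := by
  fun_induction downF d i <;> omega

lemma Dfun_nonneg (d : List Int) (i : Nat) : 0 ≤ Dfun d i :=
  le_trans (upF_nonneg d i) (le_max_left _ _)

-- the block of edges contributed by loop index i
def pvBlock (d : List Int) (i : Nat) : List (Nat × Nat × Int) :=
  if pvG d i > pvG d (i-1) then [(i-1, i, (1 : Int))]
  else if pvG d i < pvG d (i-1) then [(i, i-1, (1 : Int))]
  else [(i-1, i, (0 : Int)), (i, i-1, (0 : Int))]

lemma pvEdges_eq (d : List Int) :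
    pvEdges d = (List.range' 1 (d.length - 1)).flatMap (pvBlock d) := by
  unfold pvEdges
  rw [PySem.List.foldl_congr_mem _ _ (fun es i => es ++ pvBlock d i) _
    (by intro acc x _; beta_reduce; unfold pvBlock; split_ifs <;> rfl)]
  rw [PySem.List.foldl_append_eq_flatMap]
  rfl

lemma mem_pvEdges (d : List Int) (e : Nat × Nat × Int) :
    e ∈ pvEdges d ↔ ∃ i ∈ List.range' 1 (d.length - 1), e ∈ pvBlock d i := by
  rw [pvEdges_eq]; exact List.mem_flatMap

-- membership of the three edge kinds
lemma edge_up_mem (d : List Int) (j : Nat) (hj : j + 1 < d.length)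
    (h : pvG d (j+1) > pvG d j) : (j, j+1, (1 : Int)) ∈ pvEdges d := by
  rw [mem_pvEdges]
  refine ⟨j+1, ?_, ?_⟩
  · rw [List.mem_range'_1]; omega
  · simp [pvBlock, h]

lemma edge_eq_mem (d : List Int) (j : Nat) (hj : j + 1 < d.length)
    (h : pvG d (j+1) = pvG d j) :
    (j, j+1, (0 : Int)) ∈ pvEdges d ∧ (j+1, j, (0 : Int)) ∈ pvEdges d := by
  constructor <;> (rw [mem_pvEdges]; refine ⟨j+1, ?_, ?_⟩)
  · rw [List.mem_range'_1]; omega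
  · simp [pvBlock, h]
  · rw [List.mem_range'_1]; omega
  · simp [pvBlock, h]

lemma edge_down_mem (d : List Int) (j : Nat) (hj : j + 1 < d.length)
    (h : pvG d (j+1) < pvG d j) : (j+1, j, (1 : Int)) ∈ pvEdges d := by
  rw [mem_pvEdges]
  refine ⟨j+1, ?_, ?_⟩
  · rw [List.mem_range'_1]; omega
  · have : ¬ pvG d (j+1) > pvG d j := by omega
    simp [pvBlock, h, this]

lemma downF_last (d : List Int) (i : Nat) (h : ¬ i + 1 < d.length) : downF d i = 0 := by
  rw [downF]; simp [h]

lemma downF_gt (d : List Int) (i : Nat) (h : i + 1 < d.length) (hg : pvG d i > pvG d (i+1)) :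
    downF d i = downF d (i+1) + 1 := by
  rw [downF]; simp [h, hg]

lemma downF_eq (d : List Int) (i : Nat) (h : i + 1 < d.length) (hg : pvG d i = pvG d (i+1)) :
    downF d i = downF d (i+1) := by
  rw [downF]; simp [h, hg]

lemma downF_lt (d : List Int) (i : Nat) (hg : pvG d i < pvG d (i+1)) :
    downF d i = 0 := by
  rw [downF]; split_ifs with h1 h2 h3 <;> first | rfl | omega

-- every edge (u,v,w) satisfies Dfun u + w ≤ Dfun v, and both ends are < n
lemma edge_pot (d : List Int) (u v : Nat) (w : Int) (he : (u, v, w) ∈ pvEdges d) :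
    Dfun d u + w ≤ Dfun d v ∧ u < d.length ∧ v < d.length := by
  rw [mem_pvEdges] at he
  obtain ⟨i, hir, hib⟩ := he
  rw [List.mem_range'_1] at hir
  obtain ⟨j, rfl⟩ : ∃ j, i = j + 1 := ⟨i - 1, by omega⟩
  have hj : j + 1 < d.length := by omega
  have hun := upF_nonneg d j
  have hun1 := upF_nonneg d (j+1)
  have hdn := downF_nonneg d j
  have hdn1 := downF_nonneg d (j+1)
  unfold pvBlock at hib
  simp only [Nat.add_sub_cancel] at hib
  split_ifs at hib with h1 h2
  · -- rising step: edge (j, j+1, 1)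
    have hup : upF d (j+1) = upF d j + 1 := by simp [upF, h1]
    have hdz : downF d j = 0 := downF_lt d j h1
    simp only [List.mem_singleton, Prod.mk.injEq] at hib
    obtain ⟨rfl, rfl, rfl⟩ := hib
    exact ⟨by simp only [Dfun]; omega, by omega, by omega⟩
  · -- falling step: edge (j+1, j, 1)
    have hdg : downF d j = downF d (j+1) + 1 := downF_gt d j hj h2
    have hup : upF d (j+1) = 0 := by
      simp only [upF]; rw [if_neg (by omega), if_neg (by omega)]
    simp only [List.mem_singleton, Prod.mk.injEq] at hib
    obtain ⟨rfl, rfl, rfl⟩ := hib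
    exact ⟨by simp only [Dfun]; omega, by omega, by omega⟩
  · -- equal step: both zero edges
    have heq : pvG d (j+1) = pvG d j := by omega
    have hup : upF d (j+1) = upF d j := by
      simp only [upF]; rw [if_neg (by omega), if_pos heq]
    have hdg : downF d j = downF d (j+1) := downF_eq d j hj heq.symm
    simp only [List.mem_cons, Prod.mk.injEq, List.not_mem_nil, or_false] at hib
    rcases hib with ⟨rfl, rfl, rfl⟩ | ⟨rfl, rfl, rfl⟩ <;>
      exact ⟨by simp only [Dfun]; omega, by omega, by omega⟩

-- ---- generic facts about one relaxation pass (foldl pvStep) ----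

lemma set_getD (l : List Int) (v i : Nat) (x : Int) :
    (l.set v x).getD i 0 = if i = v ∧ v < l.length then x else l.getD i 0 := by
  rcases Nat.lt_or_ge i l.length with h | h
  · rw [List.getD_eq_getElem _ _ (by simpa using h), List.getD_eq_getElem _ _ h]
    rw [List.getElem_set]
    split_ifs with h1 h2 h3 <;> first | rfl | omega
  · rw [List.getD_eq_default _ _ (by simpa using h), List.getD_eq_default _ _ h]
    rw [if_neg (by omega)]

lemma pass_len (E : List (Nat × Nat × Int)) (st : List Int × Bool) :
    (E.foldl pvStep st).1.length = st.1.length := by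
  induction E generalizing st with
  | nil => rfl
  | cons e t ih =>
      rw [List.foldl_cons, ih]
      unfold pvStep; split <;> simp

lemma pass_flag (E : List (Nat × Nat × Int)) (st : List Int × Bool) (h : st.2 = true) :
    (E.foldl pvStep st).2 = true := by
  induction E generalizing st with
  | nil => exact h
  | cons e t ih =>
      rw [List.foldl_cons]
      apply ih
      unfold pvStep; split <;> simp [h]

lemma pass_mono (E : List (Nat × Nat × Int)) (st : List Int × Bool) (i : Nat) :
    st.1.getD i 0 ≤ (E.foldl pvStep st).1.getD i 0 := by
  induction E generalizing st with
  | nil => exact le_refl _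
  | cons e t ih =>
      rw [List.foldl_cons]
      refine le_trans ?_ (ih (pvStep st e))
      unfold pvStep; split_ifs with h
      · simp only
        rw [set_getD]
        split_ifs with h2
        · rcases h2 with ⟨rfl, _⟩; omega
        · exact le_refl _
      · exact le_refl _

lemma pass_ub (E : List (Nat × Nat × Int)) (st : List Int × Bool) (φ : Nat → Int)
    (hpot : ∀ u v w, (u, v, w) ∈ E → φ u + w ≤ φ v)
    (hub : ∀ i, st.1.getD i 0 ≤ φ i) :
    ∀ i, (E.foldl pvStep st).1.getD i 0 ≤ φ i := by
  induction E generalizing st with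
  | nil => exact hub
  | cons e t ih =>
      rw [List.foldl_cons]
      refine ih (pvStep st e) (fun u v w hm => hpot u v w (List.mem_cons_of_mem e hm)) ?_
      intro i
      unfold pvStep
      split_ifs with h
      · simp only
        rw [set_getD]
        split_ifs with h2
        · obtain ⟨rfl, _⟩ := h2
          have h3 := hpot e.1 e.2.1 e.2.2 (List.mem_cons.mpr (Or.inl rfl))
          have h4 := hub e.1
          omega
        · exact hub i
      · exact hub i

lemma pass_progress (E : List (Nat × Nat × Int)) (st : List Int × Bool)
    (u v : Nat) (w x : Int) (he : (u, v, w) ∈ E) (hv : v < st.1.length)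
    (hx : x ≤ st.1.getD u 0) :
    x + w ≤ (E.foldl pvStep st).1.getD v 0 := by
  induction E generalizing st with
  | nil => simp at he
  | cons e t ih =>
      rw [List.foldl_cons]
      rcases List.mem_cons.mp he with rfl | hmem
      · -- this edge is relaxed right now; afterwards dist[v] ≥ x + w, and it only grows
        refine le_trans ?_ (pass_mono t (pvStep st (u, v, w)) v)
        unfold pvStep
        split_ifs with h
        · simp only
          rw [set_getD]
          rw [if_pos ⟨rfl, hv⟩]
          omega
        · simp only at h ⊢; omega
      · -- some other edge first: dist[u] does not decrease, recurse
        refine ih (pvStep st e) hmem ?_ ?_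
        · have h1 : (pvStep st e).1.length = st.1.length := by
            unfold pvStep; split_ifs <;> simp
          omega
        · refine le_trans hx ?_
          have := pass_mono [e] st u
          simpa using this

lemma pass_fix (E : List (Nat × Nat × Int)) (dist : List Int)
    (h : (E.foldl pvStep (dist, false)).2 = false) :
    (E.foldl pvStep (dist, false)).1 = dist ∧
      ∀ u v w, (u, v, w) ∈ E → dist.getD u 0 + w ≤ dist.getD v 0 := by
  induction E generalizing dist with
  | nil => exact ⟨rfl, by simp⟩
  | cons e t ih =>
      rw [List.foldl_cons] at h ⊢
      by_cases hc : dist.getD e.2.1 0 < dist.getD e.1 0 + e.2.2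
      · exfalso
        have : (pvStep (dist, false) e).2 = true := by
          unfold pvStep; rw [if_pos hc]
        rw [pass_flag t _ this] at h
        simp at h
      · have hstep : pvStep (dist, false) e = (dist, false) := by
          unfold pvStep; rw [if_neg hc]
        rw [hstep] at h ⊢
        obtain ⟨h1, h2⟩ := ih dist h
        refine ⟨h1, ?_⟩
        intro u v w hm
        rcases List.mem_cons.mp hm with heq | hmem
        · subst heq; simp only at hc; omega
        · exact h2 u v w hmem

-- ---- a fixpoint dominates upF and downF ----

lemma fix_up (d : List Int) (dist : List Int)
    (hnn : ∀ i, 0 ≤ dist.getD i 0)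
    (hfix : ∀ u v w, (u, v, w) ∈ pvEdges d → dist.getD u 0 + w ≤ dist.getD v 0) :
    ∀ i, i < d.length → upF d i ≤ dist.getD i 0 := by
  intro i
  induction i with
  | zero => intro _; simpa [upF] using hnn 0
  | succ j ih =>
      intro hj1
      have hjlt : j < d.length := by omega
      rcases lt_trichotomy (pvG d (j+1)) (pvG d j) with hlt | heq | hgt
      · have hz : upF d (j+1) = 0 := by
          simp only [upF]; rw [if_neg (by omega), if_neg (by omega)]
        rw [hz]; exact hnn _
      · have hmem := (edge_eq_mem d j (by omega) heq).1
        have h1 := hfix j (j+1) 0 hmem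
        have hu : upF d (j+1) = upF d j := by
          simp only [upF]; rw [if_neg (by omega), if_pos heq]
        have h2 := ih hjlt
        omega
      · have hmem := edge_up_mem d j (by omega) hgt
        have h1 := hfix j (j+1) 1 hmem
        have hu : upF d (j+1) = upF d j + 1 := by simp [upF, hgt]
        have h2 := ih hjlt
        omega

lemma fix_down (d : List Int) (dist : List Int)
    (hnn : ∀ i, 0 ≤ dist.getD i 0)
    (hfix : ∀ u v w, (u, v, w) ∈ pvEdges d → dist.getD u 0 + w ≤ dist.getD v 0) :
    ∀ i, i < d.length → downF d i ≤ dist.getD i 0 := by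
  intro i hi
  fun_induction downF d i with
  | case1 i hlt hgt ih =>
      have hmem := edge_down_mem d i hlt hgt
      have h1 := hfix (i+1) i 1 hmem
      have h2 := ih (by omega)
      omega
  | case2 i hlt hgt heq ih =>
      have hmem := (edge_eq_mem d i hlt heq.symm).2
      have h1 := hfix (i+1) i 0 hmem
      have h2 := ih (by omega)
      omega
  | case3 => exact hnn _
  | case4 => exact hnn _

-- ---- the Bellman-Ford loop converges to Dfun ----

lemma loop_main (d : List Int) : ∀ (k p : Nat) (dist : List Int),
    dist.length = d.length →
    (∀ i, 0 ≤ dist.getD i 0) →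
    (∀ i, dist.getD i 0 ≤ Dfun d i) →
    (∀ i, i ≤ p → i < d.length → upF d i ≤ dist.getD i 0) →
    (∀ i, d.length ≤ i + p + 1 → i < d.length → downF d i ≤ dist.getD i 0) →
    d.length ≤ k + p →
    ∀ i, i < d.length → (pvLoop (pvEdges d) k dist).getD i 0 = Dfun d i := by
  intro k
  induction k with
  | zero =>
      intro p dist hlen hnn hub hup hdown hfuel i hi
      simp only [pvLoop]
      have h1 := hup i (by omega) hi
      have h2 := hdown i (by omega) hi
      have h3 := hub i
      simp only [Dfun] at h3 ⊢
      omega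
  | succ k ih =>
      intro p dist hlen hnn hub hup hdown hfuel i hi
      simp only [pvLoop]
      by_cases hflag : ((pvEdges d).foldl pvStep (dist, false)).2
      · rw [if_pos hflag]
        refine ih (p+1) ((pvEdges d).foldl pvStep (dist, false)).1 ?_ ?_ ?_ ?_ ?_ (by omega) i hi
        · rw [pass_len]; exact hlen
        · intro j; exact le_trans (hnn j) (pass_mono _ _ j)
        · exact pass_ub _ _ (Dfun d) (fun u v w hm => (edge_pot d u v w hm).1) hub
        · -- up stage advances to p+1
          intro j hjp hjn
          cases j with
          | zero => simpa [upF] using le_trans (hnn 0) (pass_mono _ _ 0)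
          | succ j =>
              have hjp' : j ≤ p := by omega
              have hjn' : j < d.length := by omega
              rcases lt_trichotomy (pvG d (j+1)) (pvG d j) with hlt | heq | hgt
              · have hz : upF d (j+1) = 0 := by
                  simp only [upF]; rw [if_neg (by omega), if_neg (by omega)]
                rw [hz]; exact le_trans (hnn _) (pass_mono _ _ _)
              · have hmem := (edge_eq_mem d j (by omega) heq).1
                have hu : upF d (j+1) = upF d j := by
                  simp only [upF]; rw [if_neg (by omega), if_pos heq]
                have := pass_progress (pvEdges d) (dist, false) j (j+1) 0 (upF d j)
                  hmem (by simpa [hlen] using hjn) (hup j hjp' hjn')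
                omega
              · have hmem := edge_up_mem d j (by omega) hgt
                have hu : upF d (j+1) = upF d j + 1 := by simp [upF, hgt]
                have := pass_progress (pvEdges d) (dist, false) j (j+1) 1 (upF d j)
                  hmem (by simpa [hlen] using hjn) (hup j hjp' hjn')
                omega
        · -- down stage advances to p+1
          intro j hjp hjn
          by_cases hj1 : j + 1 < d.length
          · rcases lt_trichotomy (pvG d j) (pvG d (j+1)) with hlt | heq | hgt
            · rw [downF_lt d j hlt]; exact le_trans (hnn _) (pass_mono _ _ _)
            · have hmem := (edge_eq_mem d j hj1 heq.symm).2
              have hd : downF d j = downF d (j+1) := downF_eq d j hj1 heq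
              have := pass_progress (pvEdges d) (dist, false) (j+1) j 0 (downF d (j+1))
                hmem (by show j < dist.length; omega) (hdown (j+1) (by omega) hj1)
              omega
            · have hmem := edge_down_mem d j hj1 hgt
              have hd : downF d j = downF d (j+1) + 1 := downF_gt d j hj1 hgt
              have := pass_progress (pvEdges d) (dist, false) (j+1) j 1 (downF d (j+1))
                hmem (by show j < dist.length; omega) (hdown (j+1) (by omega) hj1)
              omega
          · rw [downF_last d j hj1]; exact le_trans (hnn _) (pass_mono _ _ _)
      · rw [if_neg hflag]
        obtain ⟨hid, hfx⟩ := pass_fix (pvEdges d) dist (by simpa using hflag)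
        rw [hid]
        have h1 := fix_up d dist hnn hfx i hi
        have h2 := fix_down d dist hnn hfx i hi
        have h3 := hub i
        simp only [Dfun] at h3 ⊢
        omega

-- ---- B's two scans compute upF and downF ----

lemma replicate_getD (n i : Nat) : (List.replicate n (0:Int)).getD i 0 = 0 := by
  rcases Nat.lt_or_ge i n with h | h
  · rw [List.getD_eq_getElem _ _ (by simpa using h)]; simp
  · rw [List.getD_eq_default _ _ (by simpa using h)]

def upFold (d : List Int) (m : Nat) : List Int :=
  (List.range' 1 m).foldl (fun up i =>
      if pvG d i > pvG d (i-1) then up.set i (up.getD (i-1) 0 + 1)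
      else if pvG d i = pvG d (i-1) then up.set i (up.getD (i-1) 0)
      else up) (List.replicate d.length (0 : Int))

lemma upFold_spec (d : List Int) : ∀ m, m ≤ d.length - 1 →
    (upFold d m).length = d.length ∧
    ∀ i, (upFold d m).getD i 0 = if i ≤ m ∧ i < d.length then upF d i else 0 := by
  intro m
  induction m with
  | zero =>
      intro _
      refine ⟨by simp [upFold], ?_⟩
      intro i
      simp only [upFold, List.range'_zero, List.foldl_nil, replicate_getD]
      split_ifs with h
      · obtain ⟨h1, _⟩ := h
        interval_cases i
        simp [upF]
      · rfl
  | succ m ih =>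
      intro hm
      have hmn : m + 1 < d.length := by omega
      obtain ⟨ihlen, ihget⟩ := ih (by omega)
      have hfold : upFold d (m+1) =
          (if pvG d (m+1) > pvG d m then (upFold d m).set (m+1) ((upFold d m).getD m 0 + 1)
           else if pvG d (m+1) = pvG d m then (upFold d m).set (m+1) ((upFold d m).getD m 0)
           else upFold d m) := by
        show ((List.range' 1 (m+1)).foldl _ _) = _
        rw [List.range'_concat, List.foldl_append, List.foldl_cons, List.foldl_nil]
        have h1 : 1 + 1 * m = m + 1 := by omega
        rw [h1]
        have h2 : m + 1 - 1 = m := by omega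
        rw [h2]
        rfl
      have hread : (upFold d m).getD m 0 = upF d m := by
        rw [ihget]; rw [if_pos ⟨le_refl m, by omega⟩]
      refine ⟨?_, ?_⟩
      · rw [hfold]; split_ifs <;> simp [ihlen]
      · intro i
        rw [hfold, hread]
        rcases lt_trichotomy (pvG d (m+1)) (pvG d m) with hlt | heq | hgt
        · rw [if_neg (by omega), if_neg (by omega), ihget]
          by_cases hi : i = m + 1
          · subst hi
            rw [if_neg (by omega), if_pos ⟨le_refl _, hmn⟩]
            have : upF d (m+1) = 0 := by
              simp only [upF]; rw [if_neg (by omega), if_neg (by omega)]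
            omega
          · split_ifs <;> first | rfl | omega
        · rw [if_neg (by omega), if_pos heq, set_getD, ihlen]
          have hv : upF d (m+1) = upF d m := by
            simp only [upF]; rw [if_neg (by omega), if_pos heq]
          by_cases hi : i = m + 1
          · subst hi
            rw [if_pos ⟨rfl, hmn⟩, if_pos ⟨le_refl _, hmn⟩, hv]
          · rw [if_neg (by omega), ihget]
            split_ifs <;> first | rfl | omega
        · rw [if_pos hgt, set_getD, ihlen]
          have hv : upF d (m+1) = upF d m + 1 := by simp [upF, hgt]
          by_cases hi : i = m + 1
          · subst hi
            rw [if_pos ⟨rfl, hmn⟩, if_pos ⟨le_refl _, hmn⟩, hv]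
          · rw [if_neg (by omega), ihget]
            split_ifs <;> first | rfl | omega

def downFold (d : List Int) (m : Nat) (L : List Int) : List Int :=
  ((List.range m).reverse).foldl (fun dn i =>
      if pvG d i > pvG d (i+1) then dn.set i (dn.getD (i+1) 0 + 1)
      else if pvG d i = pvG d (i+1) then dn.set i (dn.getD (i+1) 0)
      else dn) L

lemma downFold_spec (d : List Int) : ∀ m, m ≤ d.length - 1 → ∀ L : List Int, L.length = d.length →
    (∀ i, m ≤ i → L.getD i 0 = if i < d.length then downF d i else 0) →
    (∀ i, i < m → L.getD i 0 = 0) →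
    (downFold d m L).length = d.length ∧
    ∀ i, (downFold d m L).getD i 0 = if i < d.length then downF d i else 0 := by
  intro m
  induction m with
  | zero =>
      intro _ L hL h1 _
      exact ⟨by simpa [downFold] using hL, fun i => by simpa [downFold] using h1 i (Nat.zero_le i)⟩
  | succ m ih =>
      intro hm L hL h1 h2
      have hmn : m + 1 < d.length := by omega
      have hfold : downFold d (m+1) L =
          downFold d m
            (if pvG d m > pvG d (m+1) then L.set m (L.getD (m+1) 0 + 1)
             else if pvG d m = pvG d (m+1) then L.set m (L.getD (m+1) 0)
             else L) := by
        show ((List.range (m+1)).reverse).foldl _ _ = _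
        rw [List.range_succ, List.reverse_append]
        rfl
      have hread : L.getD (m+1) 0 = downF d (m+1) := by
        rw [h1 (m+1) (by omega), if_pos hmn]
      rw [hfold]
      rcases lt_trichotomy (pvG d m) (pvG d (m+1)) with hlt | heq | hgt
      · rw [if_neg (by omega), if_neg (by omega)]
        refine ih (by omega) L hL ?_ ?_
        · intro i hi
          rcases Nat.eq_or_lt_of_le hi with heq | hi'
          · subst heq
            rw [h2 m (by omega), if_pos (by omega), downF_lt d m hlt]
          · exact h1 i (by omega)
        · intro i hi; exact h2 i (by omega)
      · rw [if_neg (by omega), if_pos heq, hread]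
        refine ih (by omega) _ (by simp [hL]) ?_ ?_
        · intro i hi
          rw [set_getD, hL]
          rcases Nat.eq_or_lt_of_le hi with heq' | hi'
          · subst heq'
            rw [if_pos ⟨rfl, by omega⟩, if_pos (by omega), downF_eq d m hmn heq]
          · rw [if_neg (by omega)]; exact h1 i (by omega)
        · intro i hi
          rw [set_getD, hL, if_neg (by omega)]
          exact h2 i (by omega)
      · rw [if_pos hgt, hread]
        refine ih (by omega) _ (by simp [hL]) ?_ ?_
        · intro i hi
          rw [set_getD, hL]
          rcases Nat.eq_or_lt_of_le hi with heq | hi'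
          · subst heq
            rw [if_pos ⟨rfl, by omega⟩, if_pos (by omega), downF_gt d m hmn hgt]
          · rw [if_neg (by omega)]; exact h1 i (by omega)
        · intro i hi
          rw [set_getD, hL, if_neg (by omega)]
          exact h2 i (by omega)

-- B in closed form: fold of max over Dfun
lemma alt_eq (d : List Int) :
    min_unique_centers_corrected_alt d =
      (List.range d.length).foldl (fun b i => max b (Dfun d i)) 0 + 1 := by
  have hrfl : min_unique_centers_corrected_alt d =
      (List.range d.length).foldl (fun b i =>
        max (max b ((upFold d (d.length - 1)).getD i 0))
            ((downFold d (d.length - 1) (List.replicate d.length 0)).getD i 0)) 0 + 1 := rfl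
  rw [hrfl]
  obtain ⟨_, hug⟩ := upFold_spec d (d.length - 1) (le_refl _)
  obtain ⟨_, hdg⟩ := downFold_spec d (d.length - 1) (le_refl _) (List.replicate d.length 0)
    (by simp)
    (fun i hi => by
      rw [replicate_getD]
      split_ifs with h
      · have : i = d.length - 1 := by omega
        subst this
        rw [downF_last d _ (by omega)]
      · rfl)
    (fun i _ => replicate_getD _ _)
  congr 1
  apply PySem.List.foldl_congr_mem
  intro acc x hx
  rw [List.mem_range] at hx
  rw [hug, hdg, if_pos ⟨by omega, hx⟩, if_pos hx]
  simp only [Dfun]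
  rw [max_assoc]

lemma loop_len (E : List (Nat × Nat × Int)) : ∀ (k : Nat) (dist : List Int),
    (pvLoop E k dist).length = dist.length := by
  intro k
  induction k with
  | zero => intro dist; rfl
  | succ k ih =>
      intro dist
      simp only [pvLoop]
      split_ifs
      · rw [ih, pass_len]
      · rw [pass_len]

lemma maxD_foldl (l : List Int) (hne : l ≠ []) (h0 : 0 ≤ l.getD 0 0) :
    (PySem.List.max? l (fun y => y)).getD 0 = l.foldl max 0 := by
  cases l with
  | nil => simp at hne
  | cons x t =>
      rw [PySem.List.max?_id_cons]
      simp only [Option.getD_some, List.foldl_cons]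
      simp only [List.getD_cons_zero] at h0
      rw [max_eq_right h0]

-- A in closed form (n ≥ 2)
lemma a_eq (d : List Int) (hn : 2 ≤ d.length) :
    min_unique_centers_corrected d =
      (List.range d.length).foldl (fun b i => max b (Dfun d i)) 0 + 1 := by
  have hmain := loop_main d d.length 0 (List.replicate d.length 0)
    (by simp)
    (fun i => by rw [replicate_getD])
    (fun i => by rw [replicate_getD]; exact Dfun_nonneg d i)
    (fun i hi0 hin => by
      interval_cases i
      rw [replicate_getD]; simp [upF])
    (fun i hi hin => by
      have : i = d.length - 1 := by omega
      subst this
      rw [replicate_getD, downF_last d _ (by omega)])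
    (by omega)
  have hlen : (pvLoop (pvEdges d) d.length (List.replicate d.length 0)).length = d.length := by
    rw [loop_len]; simp
  have hdist : pvLoop (pvEdges d) d.length (List.replicate d.length 0) =
      (List.range d.length).map (Dfun d) := by
    apply List.ext_getElem (by simp [hlen])
    intro i h1 h2
    rw [← List.getD_eq_getElem _ 0 h1]
    rw [hmain i (by omega)]
    rw [List.getElem_map, List.getElem_range]
  have hrfl : min_unique_centers_corrected d =
      (if d.length ≤ 1 then 1 else
        (if (pvLoop (pvEdges d) d.length (List.replicate d.length 0)).length ≠ 0 then
          (PySem.List.max? (pvLoop (pvEdges d) d.length (List.replicate d.length 0)) (fun y => y)).getD 0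
        else 0) + 1) := rfl
  rw [hrfl, if_neg (by omega), if_pos (by rw [hlen]; omega), hdist]
  rw [maxD_foldl]
  · rw [List.foldl_map]
  · simp only [ne_eq, List.map_eq_nil_iff, List.range_eq_nil]
    omega
  · rw [List.getD_eq_getElem _ _ (by simp; omega)]
    simp only [List.getElem_map]
    exact Dfun_nonneg d _
-- ===== VERDICT (by name: the statement is the Claim_ definition above) =====
theorem min_unique_centers_corrected_spec : Claim_equal_min_unique_centers_corrected := by
  intro d _
  unfold Spec_min_unique_centers_corrected
  by_cases hn : 2 ≤ d.length
  · rw [a_eq d hn, alt_eq d]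
  · have hA : min_unique_centers_corrected d = 1 := by
      have h1 : d.length ≤ 1 := by omega
      show (if d.length ≤ 1 then (1 : Int) else _) = 1
      rw [if_pos h1]
    rw [hA, alt_eq d]
    rcases (show d.length = 0 ∨ d.length = 1 by omega) with h | h
    · rw [h]; simp
    · have hd0 : downF d 0 = 0 := downF_last d 0 (by omega)
      rw [h]
      simp [List.range_succ, Dfun, upF, hd0]
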